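-- pv_equiv track=rewrite | github.com/vetlewj/coding-challenges | advent-of-code-2021/03.py | get_gamma_and_epsilon_rating
-- ===== SOURCE A (Python) =====
-- import collections
--
-- def get_gamma_and_epsilon_rating(inp_list):
--     gamma_rate = ''
--     epsilon_rate = ''
--     for col in range(len(inp_list[0])):
--         most_common_in_col = get_most_common_in_column(inp_list, col)
--         gamma_rate += most_common_in_col[0][0]
--         epsilon_rate += most_common_in_col[1][0]
--     return {'gamma_rate': gamma_rate, 'epsilon_rate': epsilon_rate}
--
-- def get_most_common_in_column(rows, column):
--     col_nums = []
--     for row in rows: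
--         col_nums.append(row[column])
--     return collections.Counter(col_nums).most_common(2)
-- ===== SOURCE B (Python) =====
-- import collections
--
-- def get_gamma_and_epsilon_rating(inp_list):
--     num_cols = len(inp_list[0])
--     counters = [collections.Counter() for _ in range(num_cols)]
--     for row in inp_list:
--         for c in range(num_cols):
--             counters[c][row[c]] += 1
--     gamma_rate = ''.join(ctr.most_common(2)[0][0] for ctr in counters)
--     epsilon_rate = ''.join(ctr.most_common(2)[1][0] for ctr in counters)
--     return {'gamma_rate': gamma_rate, 'epsilon_rate': epsilon_rate}
-- ===== Notes on version B (the rewrite author's own statement) =====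
-- stated objective: alternative
-- what changed: A scans all rows once per column (rebuilding a fresh Counter per column); B makes a single row-major pass maintaining one Counter per column, then reads each counter's most_common(2) once.
import Mathlib
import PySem

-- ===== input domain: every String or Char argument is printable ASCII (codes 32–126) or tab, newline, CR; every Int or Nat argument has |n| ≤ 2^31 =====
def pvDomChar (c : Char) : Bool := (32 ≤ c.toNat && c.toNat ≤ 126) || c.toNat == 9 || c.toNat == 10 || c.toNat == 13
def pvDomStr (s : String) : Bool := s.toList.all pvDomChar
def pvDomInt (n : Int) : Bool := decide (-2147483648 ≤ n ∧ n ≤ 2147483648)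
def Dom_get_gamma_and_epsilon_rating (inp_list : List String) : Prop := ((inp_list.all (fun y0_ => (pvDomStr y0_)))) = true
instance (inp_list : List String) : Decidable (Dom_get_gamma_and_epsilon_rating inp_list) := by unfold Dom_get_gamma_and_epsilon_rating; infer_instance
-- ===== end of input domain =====

-- B replaces A's per-column rescans of all rows by one row-major pass maintaining one Counter
-- per column (objective: alternative decomposition, same asymptotic cost).

-- Counter(xs).most_common(2): heapq.nlargest(2, items, key=count) = stable sort by count, reverse, take 2.
def pyMostCommon2 (d : PySem.Dict Char Int) : List (Char × Int) :=
  (PySem.List.sorted d.items (fun p => p.2) true).take 2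

-- ===== PORT A =====
def get_most_common_in_column (rows : List String) (column : Int) : List (Char × Int) :=
  let col_nums : List Char :=
    rows.foldl (fun acc row => acc ++ [(PySem.Str.pyGet? row column).getD ' ']) []
  pyMostCommon2 (PySem.Dict.counter col_nums)

def get_gamma_and_epsilon_rating (inp_list : List String) : List (String × String) :=
  let n : Int := PySem.Str.len (inp_list.headD "")
  let res :=
    (PySem.List.pyRange 0 n 1).foldl
      (fun (p : List Char × List Char) col =>
        let mc := get_most_common_in_column inp_list col
        (p.1 ++ [((mc[0]?).map Prod.fst).getD ' '],
         p.2 ++ [((mc[1]?).map Prod.fst).getD ' '])) ([], [])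
  [("gamma_rate", String.ofList res.1), ("epsilon_rate", String.ofList res.2)]

-- ===== PORT B =====
def counterIncr (d : PySem.Dict Char Int) (c : Char) : PySem.Dict Char Int :=
  d.modify c 0 (· + 1)

def get_gamma_and_epsilon_rating_alt (inp_list : List String) : List (String × String) :=
  let n : Int := PySem.Str.len (inp_list.headD "")
  let counters0 : List (PySem.Dict Char Int) := List.replicate n.toNat PySem.Dict.empty
  let counters :=
    inp_list.foldl
      (fun ds row => ds.mapIdx (fun c d => counterIncr d ((PySem.Str.pyGet? row (c : Int)).getD ' ')))
      counters0
  let gamma := counters.map (fun d => (((pyMostCommon2 d)[0]?).map Prod.fst).getD ' ')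
  let epsilon := counters.map (fun d => (((pyMostCommon2 d)[1]?).map Prod.fst).getD ' ')
  [("gamma_rate", String.ofList gamma), ("epsilon_rate", String.ofList epsilon)]

-- ===== PRECONDITION & SPEC =====
-- Pre_ is exactly where Python A returns: a nonempty list, no row shorter than the first
-- (else row[col] raises IndexError), and every column containing at least two distinct
-- characters (else most_common(2)[1] raises IndexError).
def Pre_get_gamma_and_epsilon_rating (inp_list : List String) : Prop :=
  inp_list ≠ [] ∧
  (∀ r ∈ inp_list, (inp_list.headD "").toList.length ≤ r.toList.length) ∧
  (∀ c ∈ List.range (inp_list.headD "").toList.length,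
      ∃ r ∈ inp_list, r.toList[c]? ≠ (inp_list.headD "").toList[c]?)
instance (inp_list : List String) : Decidable (Pre_get_gamma_and_epsilon_rating inp_list) := by
  unfold Pre_get_gamma_and_epsilon_rating; infer_instance

def pvWitness_get_gamma_and_epsilon_rating : List String := ["01", "10"]

def Spec_get_gamma_and_epsilon_rating (inp_list : List String) (out : List (String × String)) : Prop := out = get_gamma_and_epsilon_rating_alt inp_list
instance (inp_list : List String) (out : List (String × String)) : Decidable (Spec_get_gamma_and_epsilon_rating inp_list out) := by unfold Spec_get_gamma_and_epsilon_rating; infer_instance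

-- ===== CLAIM (what is proved, stated in full; the proofs are below) =====
def Claim_equal_get_gamma_and_epsilon_rating : Prop := ∀ (inp_list : List String), Dom_get_gamma_and_epsilon_rating inp_list → Pre_get_gamma_and_epsilon_rating inp_list → Spec_get_gamma_and_epsilon_rating inp_list (get_gamma_and_epsilon_rating inp_list)

-- ===== LEMMAS AND PROOFS =====

-- the character a port reads at row `row`, column `c`
def colChar (row : String) (c : Nat) : Char := (PySem.Str.pyGet? row (c : Int)).getD ' '

-- the per-column counter both sides compute
def colCounter (rows : List String) (c : Nat) : PySem.Dict Char Int :=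
  rows.foldl (fun d row => counterIncr d (colChar row c)) PySem.Dict.empty

-- A's col_nums accumulator is a map
lemma colnums_eq_map (rows : List String) (c : Nat) :
    rows.foldl (fun acc row => acc ++ [(PySem.Str.pyGet? row (c : Int)).getD ' ']) [] =
      rows.map (fun row => colChar row c) := by
  simpa [colChar] using
    PySem.List.foldl_append_singleton_eq_map (fun row => colChar row c) rows []

lemma counter_map_eq (rows : List String) (c : Nat) :
    PySem.Dict.counter (rows.map (fun row => colChar row c)) = colCounter rows c := by
  rw [PySem.Dict.counter_eq_foldl, List.foldl_map]; rfl

-- B's row-major pass keeps length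
lemma pass_length (rows : List String) (ds : List (PySem.Dict Char Int)) :
    (rows.foldl
      (fun ds row => ds.mapIdx (fun c d => counterIncr d ((PySem.Str.pyGet? row (c : Int)).getD ' ')))
      ds).length = ds.length := by
  induction rows generalizing ds with
  | nil => rfl
  | cons r rs ih => rw [List.foldl_cons, ih]; simp

-- B's row-major pass, read at one column, is the column-major fold
lemma pass_getElem (rows : List String) (ds : List (PySem.Dict Char Int)) (c : Nat)
    (hc : c < ds.length) :
    (rows.foldl
      (fun ds row => ds.mapIdx (fun c d => counterIncr d ((PySem.Str.pyGet? row (c : Int)).getD ' ')))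
      ds)[c]? =
      some (rows.foldl (fun d row => counterIncr d (colChar row c)) ds[c]) := by
  induction rows generalizing ds with
  | nil => simp [hc]
  | cons r rs ih =>
      have hc' : c < (ds.mapIdx (fun c d => counterIncr d ((PySem.Str.pyGet? r (c : Int)).getD ' '))).length := by
        simpa using hc
      rw [List.foldl_cons, ih _ hc']
      simp [colChar]

lemma counters_eq (rows : List String) (m : Nat) :
    rows.foldl
      (fun ds row => ds.mapIdx (fun c d => counterIncr d ((PySem.Str.pyGet? row (c : Int)).getD ' ')))
      (List.replicate m PySem.Dict.empty) =
      (List.range m).map (fun c => colCounter rows c) := by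
  apply List.ext_getElem?
  intro c
  by_cases hc : c < m
  · rw [pass_getElem rows _ c (by simpa using hc)]
    simp [hc, colCounter]
  · have h1 : (rows.foldl
        (fun ds row => ds.mapIdx (fun c d => counterIncr d ((PySem.Str.pyGet? row (c : Int)).getD ' ')))
        (List.replicate m (PySem.Dict.empty : PySem.Dict Char Int))).length = m := by
      simpa using pass_length rows (List.replicate m PySem.Dict.empty)
    rw [List.getElem?_eq_none (le_of_eq_of_le h1 (Nat.le_of_not_lt hc)),
        List.getElem?_eq_none (by simp [Nat.le_of_not_lt hc])]

-- A's outer accumulator loop splits into two maps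
lemma foldl_pair_append {α β γ : Type} (l : List α) (f : α → β) (g : α → γ)
    (a : List β) (b : List γ) :
    l.foldl (fun (p : List β × List γ) x => (p.1 ++ [f x], p.2 ++ [g x])) (a, b) =
      (a ++ l.map f, b ++ l.map g) := by
  induction l generalizing a b with
  | nil => simp
  | cons x xs ih => simp [ih]

lemma col_eq (rows : List String) (k : Nat) :
    get_most_common_in_column rows (k : Int) = pyMostCommon2 (colCounter rows k) := by
  unfold get_most_common_in_column
  simp only [colnums_eq_map, counter_map_eq]

theorem ports_agree (inp_list : List String) :
    get_gamma_and_epsilon_rating inp_list = get_gamma_and_epsilon_rating_alt inp_list := by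
  unfold get_gamma_and_epsilon_rating get_gamma_and_epsilon_rating_alt
  have hn : PySem.Str.len (inp_list.headD "") = ((inp_list.headD "").toList.length : Int) :=
    PySem.Str.len_eq _
  simp only [hn, Int.toNat_natCast, counters_eq, PySem.List.pyRange_one, Int.sub_zero,
    List.foldl_map, foldl_pair_append, zero_add, List.nil_append, List.map_map]
  simp only [col_eq]
  rfl

-- ===== VERDICT (by name: the statement is the Claim_ definition above) =====
theorem get_gamma_and_epsilon_rating_spec : Claim_equal_get_gamma_and_epsilon_rating := by
  intro inp_list _ _
  unfold Spec_get_gamma_and_epsilon_rating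
  exact ports_agree inp_list
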